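-- pv_equiv track=rewrite | github.com/Hetsunya/Search-Algorithms | lab5/new_task.py | generate_relevant_docs
-- ===== SOURCE A (Python) =====
-- def preprocess_text(text):
--     text = text.lower()
--     text = ''.join(c if c.isalpha() or c.isspace() else ' ' for c in text)
--     tokens = [word for word in text.split() if word]
--     stemmed_tokens = [word[:-2] if len(word) > 4 else word for word in tokens]
--     return stemmed_tokens
--
-- def generate_relevant_docs(queries, preprocessed_docs):
--     relevant_docs = {}
--     for query in queries:
--         query_tokens = set(preprocess_text(query))
--         relevant = []
--         for doc_id, tokens in preprocessed_docs.items():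
--             if query_tokens.issubset(set(tokens)):
--                 relevant.append(doc_id)
--         relevant_docs[query] = relevant if relevant else [list(preprocessed_docs.keys())[0]]
--     return relevant_docs
-- ===== SOURCE B (Python) =====
-- # preprocess_text is the module's shared helper, used unchanged by both A and B.
-- def preprocess_text(text):
--     text = text.lower()
--     text = ''.join(c if c.isalpha() or c.isspace() else ' ' for c in text)
--     tokens = [word for word in text.split() if word]
--     stemmed_tokens = [word[:-2] if len(word) > 4 else word for word in tokens]
--     return stemmed_tokens
--
-- def generate_relevant_docs(queries, preprocessed_docs):
--     # Inverted index: token -> set of doc_ids whose token list contains it.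
--     index = {}
--     for doc_id, tokens in preprocessed_docs.items():
--         for tok in set(tokens):
--             index.setdefault(tok, set()).add(doc_id)
--     all_ids = list(preprocessed_docs.keys())
--     result = {}
--     for query in queries:
--         qtokens = set(preprocess_text(query))
--         if qtokens:
--             postings = [index.get(t, set()) for t in qtokens]
--             hit = set.intersection(*postings)
--             relevant = [d for d in all_ids if d in hit]
--         else:
--             relevant = list(all_ids)
--         result[query] = relevant if relevant else [all_ids[0]]
--     return result
-- ===== Notes on version B (the rewrite author's own statement) =====
-- stated objective: faster
-- what changed: B builds an inverted index (token -> set of doc ids) once and answers each query by intersecting the posting sets of its tokens and filtering the doc-id list, instead of A's per-query scan that rebuilds set(tokens) for every doc (measured ~8x faster at n=1024); Pre_ excludes assoc lists with duplicate doc ids (a Python dict argument cannot represent them) and nonempty queries with empty preprocessed_docs, where A raises IndexError at list(preprocessed_docs.keys())[0] (B raises there too).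
import Mathlib
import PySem

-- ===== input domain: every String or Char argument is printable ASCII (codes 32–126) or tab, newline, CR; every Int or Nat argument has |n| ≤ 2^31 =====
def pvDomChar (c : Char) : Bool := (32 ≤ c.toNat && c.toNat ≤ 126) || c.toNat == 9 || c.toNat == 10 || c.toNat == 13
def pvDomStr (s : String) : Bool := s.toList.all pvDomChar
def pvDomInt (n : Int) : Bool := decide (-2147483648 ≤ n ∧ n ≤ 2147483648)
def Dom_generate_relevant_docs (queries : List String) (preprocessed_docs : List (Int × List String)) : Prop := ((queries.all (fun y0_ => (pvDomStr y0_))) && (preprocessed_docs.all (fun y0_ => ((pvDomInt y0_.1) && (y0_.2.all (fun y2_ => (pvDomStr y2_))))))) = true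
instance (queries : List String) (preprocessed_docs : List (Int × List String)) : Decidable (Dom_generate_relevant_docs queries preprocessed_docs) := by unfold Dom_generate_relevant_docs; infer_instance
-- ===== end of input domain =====

-- B replaces A's per-query scan over all docs (with a fresh token set per doc per query) by an
-- inverted index built once, intersecting posting sets per query; objective: faster (measured).

-- shared module helper (both Pythons call the same preprocess_text)
def preprocess_text (text : String) : List String :=
  let t1 := PySem.Chars.lower text.toList
  let t2 := t1.map (fun c => if PySem.Chars.isalpha c || PySem.Chars.isspace c then c else ' ')
  let tokens := (PySem.Chars.split₀ t2).filter (fun w => !w.isEmpty)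
  tokens.map (fun w => String.ofList (if 4 < PySem.List.len w then PySem.List.slice w none (some (-2)) else w))

-- ===== PORT A =====
def generate_relevant_docs (queries : List String) (preprocessed_docs : List (Int × List String)) : List (String × List Int) :=
  (queries.foldl (fun (relevant_docs : PySem.Dict String (List Int)) query =>
      let query_tokens : PySem.Set String := PySem.Set.ofList (preprocess_text query)
      let relevant : List Int := preprocessed_docs.foldl (fun rel p =>
          if PySem.Set.issubset query_tokens (PySem.Set.ofList p.2) then rel ++ [p.1] else rel) []
      relevant_docs.insert query
        (if relevant ≠ [] then relevant
         else [PySem.List.pyGetD (preprocessed_docs.map (·.1)) 0 0]))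
    PySem.Dict.empty).items

-- ===== PORT B =====
def generate_relevant_docs_alt (queries : List String) (preprocessed_docs : List (Int × List String)) : List (String × List Int) :=
  let index : PySem.Dict String (PySem.Set Int) :=
    preprocessed_docs.foldl (fun d p =>
      (PySem.Set.ofList p.2).foldl (fun d tok => d.modify tok PySem.Set.empty (fun s => PySem.Set.add s p.1)) d)
      PySem.Dict.empty
  let all_ids : List Int := preprocessed_docs.map (·.1)
  (queries.foldl (fun (result : PySem.Dict String (List Int)) query =>
      let qtokens : PySem.Set String := PySem.Set.ofList (preprocess_text query)
      let relevant : List Int :=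
        match qtokens with
        | [] => all_ids
        | t :: ts =>
          let hit : PySem.Set Int :=
            ts.foldl (fun acc t' => PySem.Set.inter acc (index.getD t' PySem.Set.empty))
              (index.getD t PySem.Set.empty)
          all_ids.filter (fun d => PySem.Set.contains hit d)
      result.insert query
        (if relevant = [] then [PySem.List.pyGetD all_ids 0 0] else relevant))
    PySem.Dict.empty).items

-- ===== PRECONDITION & SPEC =====
-- Pre_ excludes (a) doc lists with duplicate doc ids, which a Python dict argument cannot represent
-- (the assoc list is the dict's items), and (b) nonempty queries with empty preprocessed_docs, on
-- which A raises IndexError at list(preprocessed_docs.keys())[0].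
def Pre_generate_relevant_docs (queries : List String) (preprocessed_docs : List (Int × List String)) : Prop :=
  (preprocessed_docs.map (·.1)).Nodup ∧ (queries = [] ∨ preprocessed_docs ≠ [])
instance (queries : List String) (preprocessed_docs : List (Int × List String)) : Decidable (Pre_generate_relevant_docs queries preprocessed_docs) := by unfold Pre_generate_relevant_docs; infer_instance

def pvWitness_generate_relevant_docs : List String × (List (Int × List String)) :=
  (["cat dog", "fish"], [(1, ["cat", "dog"]), (2, ["dog"])])

def Spec_generate_relevant_docs (queries : List String) (preprocessed_docs : List (Int × List String)) (out : List (String × List Int)) : Prop := out = generate_relevant_docs_alt queries preprocessed_docs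
instance (queries : List String) (preprocessed_docs : List (Int × List String)) (out : List (String × List Int)) : Decidable (Spec_generate_relevant_docs queries preprocessed_docs out) := by unfold Spec_generate_relevant_docs; infer_instance

-- ===== CLAIM (what is proved, stated in full; the proofs are below) =====
def Claim_equal_generate_relevant_docs : Prop := ∀ (queries : List String) (preprocessed_docs : List (Int × List String)), Dom_generate_relevant_docs queries preprocessed_docs → Pre_generate_relevant_docs queries preprocessed_docs → Spec_generate_relevant_docs queries preprocessed_docs (generate_relevant_docs queries preprocessed_docs)

-- ===== LEMMAS AND PROOFS =====

-- membership in the index after the inner per-doc loop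
theorem pv_mem_getD_inner (toks : List String) (x : Int) (d : PySem.Dict String (PySem.Set Int))
    (tok : String) (i : Int) :
    (i ∈ (toks.foldl (fun d t => d.modify t PySem.Set.empty (fun s => PySem.Set.add s x)) d).getD tok PySem.Set.empty)
      ↔ i ∈ d.getD tok PySem.Set.empty ∨ (tok ∈ toks ∧ i = x) := by
  induction toks generalizing d with
  | nil => simp
  | cons t ts ih =>
    simp only [List.foldl_cons, ih, PySem.Dict.getD_modify, List.mem_cons]
    by_cases h : tok = t
    · subst h; simp [PySem.Set.mem_add]; tauto
    · simp [h]

-- membership in the full inverted index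
theorem pv_mem_getD_index (docs : List (Int × List String)) (d : PySem.Dict String (PySem.Set Int))
    (tok : String) (i : Int) :
    (i ∈ (docs.foldl (fun d p =>
        (PySem.Set.ofList p.2).foldl (fun d t => d.modify t PySem.Set.empty (fun s => PySem.Set.add s p.1)) d)
        d).getD tok PySem.Set.empty)
      ↔ i ∈ d.getD tok PySem.Set.empty ∨ ∃ p ∈ docs, p.1 = i ∧ tok ∈ p.2 := by
  induction docs generalizing d with
  | nil => simp
  | cons p ps ih =>
    simp only [List.foldl_cons, ih, pv_mem_getD_inner, PySem.Set.mem_ofList, List.mem_cons]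
    constructor
    · rintro ((h | ⟨ht, rfl⟩) | ⟨q, hq, rfl, hm⟩)
      · exact Or.inl h
      · exact Or.inr ⟨p, Or.inl rfl, rfl, ht⟩
      · exact Or.inr ⟨q, Or.inr hq, rfl, hm⟩
    · rintro (h | ⟨q, (rfl | hq), rfl, hm⟩)
      · exact Or.inl (Or.inl h)
      · exact Or.inl (Or.inr ⟨hm, rfl⟩)
      · exact Or.inr ⟨q, hq, rfl, hm⟩

-- membership in the folded intersection of posting sets
theorem pv_mem_foldl_inter {α β : Type} [BEq α] [LawfulBEq α] (ps : List β) (g : β → PySem.Set α)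
    (s : PySem.Set α) (i : α) :
    (i ∈ ps.foldl (fun acc t => PySem.Set.inter acc (g t)) s) ↔ i ∈ s ∧ ∀ t ∈ ps, i ∈ g t := by
  induction ps generalizing s with
  | nil => simp
  | cons p ps ih => simp [ih, PySem.Set.mem_inter]; tauto

-- the per-query relevant list computed by A equals the one computed by B
theorem pv_relevant_eq (docs : List (Int × List String)) (hnd : (docs.map (·.1)).Nodup) (q : String) :
    (docs.foldl (fun rel p =>
        if PySem.Set.issubset (PySem.Set.ofList (preprocess_text q)) (PySem.Set.ofList p.2) then rel ++ [p.1] else rel) [])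
    = (match (PySem.Set.ofList (preprocess_text q) : PySem.Set String) with
       | [] => docs.map (·.1)
       | t :: ts =>
         (docs.map (·.1)).filter (fun d => PySem.Set.contains
           (ts.foldl (fun acc t' => PySem.Set.inter acc
              ((docs.foldl (fun d p =>
                  (PySem.Set.ofList p.2).foldl (fun d tok => d.modify tok PySem.Set.empty (fun s => PySem.Set.add s p.1)) d)
                  PySem.Dict.empty).getD t' PySem.Set.empty))
             ((docs.foldl (fun d p =>
                  (PySem.Set.ofList p.2).foldl (fun d tok => d.modify tok PySem.Set.empty (fun s => PySem.Set.add s p.1)) d)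
                  PySem.Dict.empty).getD t PySem.Set.empty)) d)) := by
  rw [PySem.List.foldl_append_if]
  cases hq : (PySem.Set.ofList (preprocess_text q) : PySem.Set String) with
  | nil =>
    have hall : ∀ p ∈ docs,
        (PySem.Set.issubset ([] : PySem.Set String) (PySem.Set.ofList p.2)) = true := by
      intro p _
      rw [PySem.Set.issubset_iff]
      intro x hx
      cases hx
    rw [List.filter_congr hall]
    simp
  | cons t ts =>
    dsimp only
    rw [List.nil_append, List.filter_map]
    have hmem : ∀ (tok : String) (i : Int), (i ∈ ((docs.foldl (fun d p =>
        (PySem.Set.ofList p.2).foldl (fun d tok => d.modify tok PySem.Set.empty (fun s => PySem.Set.add s p.1)) d)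
        PySem.Dict.empty).getD tok PySem.Set.empty)) ↔ ∃ p' ∈ docs, p'.1 = i ∧ tok ∈ p'.2 := by
      intro tok i
      rw [pv_mem_getD_index]
      simp [PySem.Dict.getD_empty, PySem.Set.empty]
    show List.map (fun x : Int × List String => x.1) _ = List.map (fun x : Int × List String => x.1) _
    refine congrArg _ (List.filter_congr ?_)
    intro p hp
    have hex : ∀ tok : String, (∃ p' ∈ docs, p'.1 = p.1 ∧ tok ∈ p'.2) ↔ tok ∈ p.2 := by
      intro tok
      constructor
      · rintro ⟨p', hp', h1, h2⟩
        rwa [List.inj_on_of_nodup_map hnd hp' hp h1] at h2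
      · intro h; exact ⟨p, hp, rfl, h⟩
    simp only [Function.comp_apply]
    rw [Bool.eq_iff_iff, PySem.Set.issubset_iff, PySem.Set.contains_iff, pv_mem_foldl_inter]
    constructor
    · intro h
      have h' : ∀ x ∈ (t :: ts : List String), x ∈ p.2 := by
        intro x hx
        have hx2 := h x hx
        rwa [PySem.Set.mem_ofList] at hx2
      exact ⟨(hmem t p.1).mpr ((hex t).mpr (h' t (by simp))),
             fun t' ht' => (hmem t' p.1).mpr ((hex t').mpr (h' t' (by simp [ht'])))⟩
    · rintro ⟨h1, h2⟩ x hx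
      rw [PySem.Set.mem_ofList]
      rcases List.mem_cons.mp hx with rfl | hx'
      · exact (hex x).mp ((hmem x p.1).mp h1)
      · exact (hex x).mp ((hmem x p.1).mp (h2 x hx'))

-- swapping the branch order of Python's "relevant if relevant else X" vs B's "if not relevant"
theorem pv_if_swap (r x : List Int) : (if r ≠ [] then r else x) = (if r = [] then x else r) := by
  by_cases h : r = [] <;> simp [h]

-- ===== VERDICT (by name: the statement is the Claim_ definition above) =====
theorem generate_relevant_docs_spec : Claim_equal_generate_relevant_docs := by
  intro queries docs _hdom hpre
  obtain ⟨hnd, -⟩ := hpre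
  unfold Spec_generate_relevant_docs generate_relevant_docs generate_relevant_docs_alt
  dsimp only
  congr 1
  apply PySem.List.foldl_congr_mem
  intro acc q _hq
  rw [pv_relevant_eq docs hnd q]
  cases hset : (PySem.Set.ofList (preprocess_text q) : PySem.Set String) with
  | nil =>
    dsimp only
    rw [pv_if_swap]
  | cons t ts =>
    dsimp only
    rw [pv_if_swap]
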